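-- pv_equiv track=rewrite | github.com/Nafaryus27/pySIMS | pySIMS.py | format_ionic_complex_symbol
-- ===== SOURCE A (Python) =====
-- def read_isotope_reference (ref):
--     elem = ''
--     int_mass_str = ''
--     inmass = True
--     for c in ref:
--         if not c.isdigit () and not inmass :
--             elem += c
--         if not c.isdigit () and inmass:
--             inmass = not inmass
--             elem += c
--         if c.isdigit () and inmass :
--             int_mass_str += c
--         if c.isdigit () and not inmass :
--             elem += c
--     int_mass = int (int_mass_str)
--     return int_mass, elem
--
-- def format_isotope_symbol (ref):
--     ref_int_mass, elem = read_isotope_reference (ref)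
--     if elem [-1].isdigit ():
--         ion = elem[:-1] + '$_' + elem[-1] + '$'
--     else:
--         ion = elem
--     return r'${}^{' + f'{ref_int_mass:d}' + '}$'+ ion
--
-- def format_ionic_complex_symbol (ref):
--     start_idx_ = (0,)
--     inmass = True
--     idx = 0
--     # if 'Cs2' in ref and len (ref) != 6:
--     #     formatted_complex_symbol = r'${}^{133}$Cs$_2$' + format_isotope_symbol (ref.split(' ')[1])
--     for c in ref:
--         if not c.isdigit() and inmass:
--             inmass = not inmass
--         if c.isdigit() and not inmass:
--             start_idx_ += (idx,)
--             inmass = not inmass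
--         idx += 1
--     if 'Cs2' in ref:
--         start_idx = start_idx_[:-1]
--     else:
--         start_idx = start_idx_
--     formatted_complex_symbol = ''
--     for i in range(len(start_idx)-1):
--         formatted_complex_symbol += format_isotope_symbol (ref[start_idx[i]:start_idx[i+1]])
--     formatted_complex_symbol += format_isotope_symbol (ref[start_idx[-1]:])
--     return formatted_complex_symbol
-- ===== SOURCE B (Python) =====
-- def format_isotope_symbol(seg):
--     # split seg into its leading digit run (the mass) and the remainder (the element)
--     k = 0
--     while k < len(seg) and seg[k].isdigit():
--         k += 1
--     mass, elem = seg[:k], seg[k:]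
--     if elem[-1].isdigit():
--         elem = elem[:-1] + '$_' + elem[-1] + '$'
--     return '${}^{' + str(int(mass)) + '}$' + elem
--
--
-- def format_ionic_complex_symbol(ref):
--     # group characters into segments: a new segment starts at each digit
--     # that follows a non-digit character
--     segs, cur, prev = [], '', None
--     for c in ref:
--         if prev is not None and c.isdigit() and not prev.isdigit():
--             segs.append(cur)
--             cur = ''
--         cur += c
--         prev = c
--     if 'Cs2' in ref and segs:
--         cur = segs.pop() + cur
--     return ''.join(format_isotope_symbol(s) for s in segs + [cur])
-- ===== Notes on version B (the rewrite author's own statement) =====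
-- stated objective: alternative
-- what changed: B splits the string into isotope segments in one grouping pass that builds the segment strings directly (new segment at each digit following a non-digit, merging the last two segments when 'Cs2' occurs), instead of A's state-machine that collects split indices into a tuple and then re-slices the string; the mass/element split is done by a leading-digit-run partition instead of A's four-branch per-character state machine.
import Mathlib
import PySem

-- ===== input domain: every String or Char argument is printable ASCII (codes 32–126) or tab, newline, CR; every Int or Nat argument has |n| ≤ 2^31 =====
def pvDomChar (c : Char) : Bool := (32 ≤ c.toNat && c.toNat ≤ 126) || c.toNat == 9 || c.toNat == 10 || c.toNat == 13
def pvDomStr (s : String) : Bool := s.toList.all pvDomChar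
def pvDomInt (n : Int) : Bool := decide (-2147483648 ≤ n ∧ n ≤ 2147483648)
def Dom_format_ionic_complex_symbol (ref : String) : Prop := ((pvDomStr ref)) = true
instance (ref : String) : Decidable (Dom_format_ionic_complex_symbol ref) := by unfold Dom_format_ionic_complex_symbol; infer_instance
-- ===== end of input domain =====

-- B replaces A's index-collecting state machine + re-slicing by a single grouping pass that
-- builds the isotope segments directly (objective: alternative, same cost).

-- ===== PORT A =====
-- read_isotope_reference: the four sequential ifs, transliterated over (elem, int_mass_str, inmass)
def pvReadIsoStep (st : List Char × List Char × Bool) (c : Char) : List Char × List Char × Bool :=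
  let elem := st.1
  let mass := st.2.1
  let inmass := st.2.2
  let elem := if !(PySem.Chars.isdigit c) && !inmass then elem ++ [c] else elem
  let q := if !(PySem.Chars.isdigit c) && inmass then (!inmass, elem ++ [c]) else (inmass, elem)
  let inmass := q.1
  let elem := q.2
  let mass := if PySem.Chars.isdigit c && inmass then mass ++ [c] else mass
  let elem := if PySem.Chars.isdigit c && !inmass then elem ++ [c] else elem
  (elem, mass, inmass)

def pvReadIso (seg : List Char) : Int × List Char :=
  let st := seg.foldl pvReadIsoStep ([], [], true)
  -- int(int_mass_str): ValueError on an empty digit string is excluded by Pre_; .getD 0 is unreachable there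
  ((PySem.Int.ofChars? st.2.1).getD 0, st.1)

-- format_isotope_symbol (strings as List Char)
def pvFormatIso (seg : List Char) : List Char :=
  let r := pvReadIso seg
  let elem := r.2
  -- elem[-1]: IndexError on empty elem is excluded by Pre_; the ' ' default is unreachable there
  let ion := if PySem.Chars.isdigit (PySem.List.pyGetD elem (-1) ' ') then
      PySem.List.slice elem none (some (-1)) ++ "$_".toList ++ [PySem.List.pyGetD elem (-1) ' '] ++ "$".toList
    else elem
  "${}^{".toList ++ PySem.Int.toChars r.1 ++ "}$".toList ++ ion

def pvBoundStep (st : List Int × Bool × Int) (c : Char) : List Int × Bool × Int :=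
  let idxs := st.1
  let inmass := st.2.1
  let idx := st.2.2
  let inmass := if !(PySem.Chars.isdigit c) && inmass then !inmass else inmass
  let q := if PySem.Chars.isdigit c && !inmass then (idxs ++ [idx], !inmass) else (idxs, inmass)
  (q.1, q.2, idx + 1)

def format_ionic_complex_symbol (ref : String) : String :=
  let l := ref.toList
  let st := l.foldl pvBoundStep ([(0 : Int)], true, (0 : Int))
  let start_idx := if PySem.Chars.isIn "Cs2".toList l then PySem.List.slice st.1 none (some (-1)) else st.1
  -- start_idx[-1] on an empty tuple would be an IndexError in Python; unreachable ('Cs2' forces a split index)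
  let body := (PySem.List.pyRange 0 ((start_idx.length : Int) - 1) 1).foldl
      (fun acc i => acc ++ pvFormatIso (PySem.List.slice l (some (PySem.List.pyGetD start_idx i 0))
                                                          (some (PySem.List.pyGetD start_idx (i + 1) 0)))) []
  String.ofList (body ++ pvFormatIso (PySem.List.slice l (some (PySem.List.pyGetD start_idx (-1) 0)) none))

-- ===== PORT B =====
-- while k < len(seg) and seg[k].isdigit(): k += 1;  mass, elem = seg[:k], seg[k:]
-- (the obvious structural recursion for the leading-digit-run split)
def altSplitMass : List Char → List Char × List Char
  | [] => ([], [])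
  | c :: rest =>
    if PySem.Chars.isdigit c then
      let p := altSplitMass rest
      (c :: p.1, p.2)
    else ([], c :: rest)

def altFormatIso (seg : List Char) : List Char :=
  let p := altSplitMass seg
  -- elem[-1]: IndexError on empty elem is excluded by Pre_; the ' ' default is unreachable there
  let elem := if PySem.Chars.isdigit (PySem.List.pyGetD p.2 (-1) ' ') then
      PySem.List.slice p.2 none (some (-1)) ++ "$_".toList ++ [PySem.List.pyGetD p.2 (-1) ' '] ++ "$".toList
    else p.2
  -- int(mass): ValueError (no leading digits) is excluded by Pre_; .getD 0 is unreachable there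
  "${}^{".toList ++ PySem.Int.toChars ((PySem.Int.ofChars? p.1).getD 0) ++ "}$".toList ++ elem

def altGroupStep (st : List (List Char) × List Char × Option Char) (c : Char) :
    List (List Char) × List Char × Option Char :=
  let q := match st.2.2 with
    | some p =>
      if PySem.Chars.isdigit c && !(PySem.Chars.isdigit p) then (st.1 ++ [st.2.1], ([] : List Char))
      else (st.1, st.2.1)
    | none => (st.1, st.2.1)
  (q.1, q.2 ++ [c], some c)

def format_ionic_complex_symbol_alt (ref : String) : String :=
  let st := ref.toList.foldl altGroupStep ([], [], none)
  -- if 'Cs2' in ref and segs: cur = segs.pop() + cur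
  let q := if PySem.Chars.isIn "Cs2".toList ref.toList && !st.1.isEmpty then
      (st.1.dropLast, (st.1.getLast?.getD []) ++ st.2.1)
    else (st.1, st.2.1)
  -- ''.join(...) over segs + [cur]
  String.ofList (((q.1 ++ [q.2]).map altFormatIso).flatten)

-- ===== PRECONDITION & SPEC =====
-- Pre_ excludes exactly the inputs where the Python A raises: a ValueError (int() of an empty mass digit-run) when the
-- string does not start with a digit (or is empty), and an IndexError (elem[-1] of an empty element) when the
-- final segment is all digits, i.e. when the string ends in a digit and contains no 'Cs2'.
def Pre_format_ionic_complex_symbol (ref : String) : Prop :=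
  PySem.Chars.isdigit (ref.toList.headD ' ') = true ∧
  (PySem.Chars.isIn "Cs2".toList ref.toList = true ∨
   PySem.Chars.isdigit (ref.toList.getLastD ' ') = false)
instance (ref : String) : Decidable (Pre_format_ionic_complex_symbol ref) := by
  unfold Pre_format_ionic_complex_symbol; infer_instance
def pvWitness_format_ionic_complex_symbol : String := "12C14N"

def Spec_format_ionic_complex_symbol (ref : String) (out : String) : Prop :=
  out = format_ionic_complex_symbol_alt ref
instance (ref : String) (out : String) : Decidable (Spec_format_ionic_complex_symbol ref out) := by
  unfold Spec_format_ionic_complex_symbol; infer_instance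

-- ===== CLAIM (what is proved, stated in full; the proofs are below) =====
def Claim_equal_format_ionic_complex_symbol : Prop := ∀ (ref : String), Dom_format_ionic_complex_symbol ref → Pre_format_ionic_complex_symbol ref → Spec_format_ionic_complex_symbol ref (format_ionic_complex_symbol ref)

-- ===== LEMMAS AND PROOFS =====

lemma readIso_foldl_false (l : List Char) : ∀ (elem mass : List Char),
    l.foldl pvReadIsoStep (elem, mass, false) = (elem ++ l, mass, false) := by
  induction l with
  | nil => simp
  | cons c rest ih =>
    intro elem mass
    by_cases h : PySem.Chars.isdigit c = true <;>
      simp [pvReadIsoStep, h, ih]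

lemma readIso_foldl_true (l : List Char) : ∀ (elem mass : List Char),
    l.foldl pvReadIsoStep (elem, mass, true) =
      (elem ++ l.dropWhile PySem.Chars.isdigit,
       mass ++ l.takeWhile PySem.Chars.isdigit,
       l.all PySem.Chars.isdigit) := by
  induction l with
  | nil => simp
  | cons c rest ih =>
    intro elem mass
    by_cases h : PySem.Chars.isdigit c = true
    · simp [pvReadIsoStep, h, ih]
    · simp [pvReadIsoStep, h, readIso_foldl_false]

lemma altSplitMass_eq (l : List Char) :
    altSplitMass l = (l.takeWhile PySem.Chars.isdigit, l.dropWhile PySem.Chars.isdigit) := by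
  induction l with
  | nil => simp [altSplitMass]
  | cons c rest ih =>
    by_cases h : PySem.Chars.isdigit c = true <;>
      simp [altSplitMass, h, ih]

lemma formatIso_eq (seg : List Char) : pvFormatIso seg = altFormatIso seg := by
  simp [pvFormatIso, pvReadIso, altFormatIso, readIso_foldl_true, altSplitMass_eq]
def pvPrevMass : Option Char → Bool
  | none => true
  | some p => PySem.Chars.isdigit p

def pvStarts (segs : List (List Char)) : List Int :=
  (List.range (segs.length + 1)).map (fun i => (((segs.take i).flatten.length : Nat) : Int))

lemma pvStarts_push (segs : List (List Char)) (cur : List Char) :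
    pvStarts (segs ++ [cur]) = pvStarts segs ++ [((segs.flatten ++ cur).length : Int)] := by
  unfold pvStarts
  rw [show (segs ++ [cur]).length + 1 = (segs.length + 1) + 1 by simp, List.range_succ,
    List.map_append]
  congr 1
  · apply List.map_congr_left
    intro i hi
    rw [List.mem_range] at hi
    rw [List.take_append_of_le_length (by omega)]
  · simp [List.take_of_length_le]

lemma group_flatten (l : List Char) : ∀ segs cur prev,
    (l.foldl altGroupStep (segs, cur, prev)).1.flatten ++ (l.foldl altGroupStep (segs, cur, prev)).2.1
      = segs.flatten ++ cur ++ l := by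
  induction l with
  | nil => simp
  | cons c rest ih =>
    intro segs cur prev
    match prev with
    | none => simp [altGroupStep, ih]
    | some p =>
      by_cases h : (PySem.Chars.isdigit c && !(PySem.Chars.isdigit p)) = true <;>
        simp [altGroupStep, h, ih]

lemma main_fold (l : List Char) : ∀ segs cur prev,
    l.foldl pvBoundStep (pvStarts segs, pvPrevMass prev, ((segs.flatten ++ cur).length : Int))
      = (pvStarts (l.foldl altGroupStep (segs, cur, prev)).1,
         pvPrevMass (l.foldl altGroupStep (segs, cur, prev)).2.2,
         (((l.foldl altGroupStep (segs, cur, prev)).1.flatten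
            ++ (l.foldl altGroupStep (segs, cur, prev)).2.1).length : Int)) := by
  induction l with
  | nil => simp
  | cons c rest ih =>
    intro segs cur prev
    rw [List.foldl_cons, List.foldl_cons]
    match prev with
    | none =>
      by_cases h : PySem.Chars.isdigit c = true
      · have : pvBoundStep (pvStarts segs, pvPrevMass none, ((segs.flatten ++ cur).length : Int)) c
            = (pvStarts segs, pvPrevMass (some c), ((segs.flatten ++ (cur ++ [c])).length : Int)) := by
          simp [pvBoundStep, pvPrevMass, h]
          ring
        rw [this]
        have hb : altGroupStep (segs, cur, none) c = (segs, cur ++ [c], some c) := by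
          simp [altGroupStep]
        rw [hb, ih]
      · have : pvBoundStep (pvStarts segs, pvPrevMass none, ((segs.flatten ++ cur).length : Int)) c
            = (pvStarts segs, pvPrevMass (some c), ((segs.flatten ++ (cur ++ [c])).length : Int)) := by
          simp [pvBoundStep, pvPrevMass, h]
          ring
        rw [this]
        have hb : altGroupStep (segs, cur, none) c = (segs, cur ++ [c], some c) := by
          simp [altGroupStep]
        rw [hb, ih]
    | some p =>
      by_cases hp : PySem.Chars.isdigit p = true
      · have : pvBoundStep (pvStarts segs, pvPrevMass (some p), ((segs.flatten ++ cur).length : Int)) c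
            = (pvStarts segs, pvPrevMass (some c), ((segs.flatten ++ (cur ++ [c])).length : Int)) := by
          by_cases h : PySem.Chars.isdigit c = true <;>
            (simp [pvBoundStep, pvPrevMass, hp, h]; ring)
        rw [this]
        have hb : altGroupStep (segs, cur, some p) c = (segs, cur ++ [c], some c) := by
          simp [altGroupStep, hp]
        rw [hb, ih]
      · by_cases h : PySem.Chars.isdigit c = true
        · have : pvBoundStep (pvStarts segs, pvPrevMass (some p), ((segs.flatten ++ cur).length : Int)) c
              = (pvStarts (segs ++ [cur]), pvPrevMass (some c), (((segs ++ [cur]).flatten ++ [c]).length : Int)) := by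
            simp [pvBoundStep, pvPrevMass, hp, h, pvStarts_push]; ring
          rw [this]
          have hb : altGroupStep (segs, cur, some p) c = (segs ++ [cur], [c], some c) := by
            simp [altGroupStep, hp, h]
          rw [hb]
          have := ih (segs ++ [cur]) [c] (some c)
          simpa using this
        · have : pvBoundStep (pvStarts segs, pvPrevMass (some p), ((segs.flatten ++ cur).length : Int)) c
              = (pvStarts segs, pvPrevMass (some c), ((segs.flatten ++ (cur ++ [c])).length : Int)) := by
            simp [pvBoundStep, pvPrevMass, hp, h]; ring
          rw [this]
          have hb : altGroupStep (segs, cur, some p) c = (segs, cur ++ [c], some c) := by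
            simp [altGroupStep, hp, h]
          rw [hb, ih]
lemma pvStarts_getD (segs : List (List Char)) (k : Nat) (hk : k ≤ segs.length) :
    (pvStarts segs).getD k 0 = (((segs.take k).flatten.length : Nat) : Int) := by
  unfold pvStarts
  simp [List.getD_eq_getElem?_getD, Nat.lt_succ_of_le hk]

lemma pvStarts_ne_nil (segs : List (List Char)) : pvStarts segs ≠ [] := by
  unfold pvStarts
  simp

lemma pvStarts_getLast (segs : List (List Char)) (h : pvStarts segs ≠ []) :
    (pvStarts segs).getLast h = ((segs.flatten.length : Nat) : Int) := by
  have : (pvStarts segs).getLast h = (pvStarts segs).getD segs.length 0 := by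
    rw [List.getLast_eq_getElem]
    have hl : (pvStarts segs).length = segs.length + 1 := by unfold pvStarts; simp
    simp [List.getD_eq_getElem?_getD, hl]
  rw [this, pvStarts_getD segs segs.length le_rfl, List.take_length]

lemma slice_piece (segs : List (List Char)) (cur : List Char) (k : Nat) (hk : k < segs.length) :
    PySem.List.slice (segs.flatten ++ cur) (some (((segs.take k).flatten.length : Nat) : Int))
      (some (((segs.take (k + 1)).flatten.length : Nat) : Int)) = segs.getD k [] := by
  have hget : segs.getD k [] = segs[k] := by
    simp [List.getD_eq_getElem?_getD, List.getElem?_eq_getElem hk]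
  have hsplit : segs.flatten ++ cur
      = (segs.take k).flatten ++ (segs[k] ++ ((segs.drop (k + 1)).flatten ++ cur)) := by
    conv_lhs => rw [← List.take_append_drop k segs]
    rw [List.drop_eq_getElem_cons hk]
    simp only [List.flatten_append, List.flatten_cons, List.append_assoc]
  have hlen1 : (segs.take (k + 1)).flatten.length
      = (segs.take k).flatten.length + segs[k].length := by
    simp only [List.length_flatten, List.map_take]
    rw [List.sum_take_succ _ k (by simpa using hk)]
    simp
  rw [PySem.List.slice_natCast, hsplit, List.drop_left, hlen1, hget]
  simp

lemma map_getD_range (f : List Char → List Char) (segs : List (List Char)) :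
    (List.range segs.length).map (fun k => f (segs.getD k [])) = segs.map f := by
  induction segs with
  | nil => simp
  | cons s rest ih =>
    simp only [List.length_cons, List.range_succ_eq_map, List.map_cons, List.map_map]
    simp only [Function.comp_def, List.getD_cons_succ, List.getD_cons_zero]
    rw [ih]

lemma assemble (segs : List (List Char)) (cur : List Char) :
    ((PySem.List.pyRange 0 (((pvStarts segs).length : Int) - 1) 1).foldl
      (fun acc i => acc ++ pvFormatIso (PySem.List.slice (segs.flatten ++ cur)
          (some (PySem.List.pyGetD (pvStarts segs) i 0))
          (some (PySem.List.pyGetD (pvStarts segs) (i + 1) 0)))) [])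
    ++ pvFormatIso (PySem.List.slice (segs.flatten ++ cur)
          (some (PySem.List.pyGetD (pvStarts segs) (-1) 0)) none)
    = ((segs ++ [cur]).map pvFormatIso).flatten := by
  have hlen : ((pvStarts segs).length : Int) - 1 = (segs.length : Int) := by
    unfold pvStarts; simp
  rw [hlen, PySem.List.foldl_append_eq_flatMap]
  have hlast : PySem.List.pyGetD (pvStarts segs) (-1) 0 = ((segs.flatten.length : Nat) : Int) := by
    rw [PySem.List.pyGetD_neg_one _ _ (pvStarts_ne_nil segs), pvStarts_getLast]
  have hfinal : PySem.List.slice (segs.flatten ++ cur)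
      (some (PySem.List.pyGetD (pvStarts segs) (-1) 0)) none = cur := by
    rw [hlast, PySem.List.slice_from_natCast, List.drop_left]
  rw [hfinal]
  have hmap : (List.range segs.length).map (fun k : Nat => pvFormatIso (PySem.List.slice (segs.flatten ++ cur)
        (some (PySem.List.pyGetD (pvStarts segs) ((0 : Int) + (k : Int)) 0))
        (some (PySem.List.pyGetD (pvStarts segs) (((0 : Int) + (k : Int)) + 1) 0))))
      = segs.map pvFormatIso := by
    rw [← map_getD_range pvFormatIso segs]
    apply List.map_congr_left
    intro k hk
    rw [List.mem_range] at hk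
    rw [show ((0 : Int) + (k : Int)) = ((k : Nat) : Int) by ring,
      show ((k : Int) + 1) = ((k + 1 : Nat) : Int) by push_cast; ring]
    rw [PySem.List.pyGetD_natCast, PySem.List.pyGetD_natCast,
      pvStarts_getD segs k (le_of_lt hk), pvStarts_getD segs (k + 1) hk,
      slice_piece segs cur k hk]
  rw [PySem.List.pyRange_one]
  simp only [Int.sub_zero, Int.toNat_natCast, List.flatMap_def]
  rw [List.map_map]
  simp only [Function.comp_def]
  rw [hmap]

  simp
lemma map_formatIso_eq (xs : List (List Char)) :
    List.map pvFormatIso xs = List.map altFormatIso xs :=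
  List.map_congr_left (fun x _ => formatIso_eq x)

lemma altGroupStep_prev (st : List (List Char) × List Char × Option Char) (c : Char) :
    (altGroupStep st c).2.2 = some c := rfl

lemma group_mono (l : List Char) : ∀ st, st.1.length ≤ (l.foldl altGroupStep st).1.length := by
  induction l with
  | nil => intro st; simp
  | cons c rest ih =>
    intro st
    refine le_trans ?_ (ih (altGroupStep st c))
    cases hp : st.2.2 <;> simp only [altGroupStep, hp]
    · simp
    · split <;> simp

lemma cs2_group_ne_nil (l : List Char) (h : PySem.Chars.isIn "Cs2".toList l = true) :
    (l.foldl altGroupStep ([], [], none)).1 ≠ [] := by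
  rw [PySem.Chars.isIn_iff_infix] at h
  obtain ⟨u, v, huv⟩ : ∃ u v, l = u ++ "Cs2".toList ++ v := by
    obtain ⟨s, t, h'⟩ := h
    exact ⟨s, t, h'.symm⟩
  have hdec : l.foldl altGroupStep ([], [], none)
      = v.foldl altGroupStep (altGroupStep (altGroupStep (altGroupStep
          (u.foldl altGroupStep ([], [], none)) 'C') 's') '2') := by
    rw [huv]
    simp [List.foldl_append]
  set st1 := altGroupStep (u.foldl altGroupStep ([], [], none)) 'C' with hst1
  set st2 := altGroupStep st1 's' with hst2
  have h3 : (altGroupStep st2 '2').1.length = st2.1.length + 1 := by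
    have h2 : st2.2.2 = some 's' := altGroupStep_prev _ _
    simp only [altGroupStep, h2]
    rw [if_pos (by decide)]
    simp
  have hmono := group_mono v (altGroupStep st2 '2')
  intro hnil
  rw [hdec] at hnil
  rw [hnil] at hmono
  rw [h3] at hmono
  simp at hmono

-- A = B on every input (the Pre_ hypothesis marks where the Python A returns at all)
lemma formatIonic_AB_eq (ref : String) :
    format_ionic_complex_symbol ref = format_ionic_complex_symbol_alt ref := by
  unfold format_ionic_complex_symbol format_ionic_complex_symbol_alt
  dsimp only
  set l := ref.toList with hl
  have h0 : (([(0 : Int)], true, (0 : Int)) : List Int × Bool × Int)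
      = (pvStarts [], pvPrevMass none,
         (((([] : List (List Char)).flatten ++ ([] : List Char)).length : Nat) : Int)) := by
    simp [pvStarts, pvPrevMass]
  rw [h0, main_fold]
  set G := List.foldl altGroupStep ([], [], none) l with hG
  have hflat : G.1.flatten ++ G.2.1 = l := by simpa using group_flatten l [] [] none
  by_cases hc : PySem.Chars.isIn "Cs2".toList l = true
  · have hne : G.1 ≠ [] := by rw [hG]; exact cs2_group_ne_nil l hc
    obtain ⟨S₀, s, hS⟩ : ∃ S₀ s, G.1 = S₀ ++ [s] :=
      ⟨G.1.dropLast, G.1.getLast hne, (List.dropLast_append_getLast hne).symm⟩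
    rw [if_pos hc, if_pos (by simp [hS]; simpa using hc)]
    rw [PySem.List.slice_to_neg_one, hS, pvStarts_push, List.dropLast_concat]
    have hl2 : l = S₀.flatten ++ (s ++ G.2.1) := by rw [← hflat, hS]; simp
    rw [hl2, assemble S₀ (s ++ G.2.1)]
    simp [formatIso_eq, map_formatIso_eq]
  · rw [if_neg hc, if_neg (by simp; intro h; exact absurd (by simpa using h) hc)]
    rw [← hflat, assemble G.1 G.2.1]
    simp [formatIso_eq, map_formatIso_eq]

-- ===== VERDICT (by name: the statement is the Claim_ definition above) =====
theorem format_ionic_complex_symbol_spec : Claim_equal_format_ionic_complex_symbol := by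
  unfold Claim_equal_format_ionic_complex_symbol Spec_format_ionic_complex_symbol
  intro ref _ _
  exact formatIonic_AB_eq ref
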